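-- pv_equiv track=rewrite | github.com/amitpo23/medici-price-prediction | src/analytics/meta_learner.py | _group_accuracy_by_season
-- ===== SOURCE A (Python) =====
-- from collections import defaultdict
--
-- MONTH_TO_SEASON = {
--     1: "winter", 2: "winter", 3: "spring", 4: "spring",
--     5: "spring", 6: "summer", 7: "summer", 8: "summer",
--     9: "fall", 10: "fall", 11: "fall", 12: "winter",
-- }
--
-- def _group_accuracy_by_season(predictions: dict) -> dict[str, dict[str, int]]:
--     """Group predictions by season."""
--     groups: dict[str, dict[str, int]] = defaultdict(lambda: {"total": 0, "call": 0, "put": 0, "none": 0})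
--
--     for detail_id, pred in predictions.items():
--         checkin = pred.get("date_from", "")
--         season = "unknown"
--         if checkin and len(checkin) >= 7:
--             try:
--                 month = int(checkin[5:7])
--                 season = MONTH_TO_SEASON.get(month, "unknown")
--             except (ValueError, IndexError):
--                 pass
--
--         signal = pred.get("option_signal", "NONE") or "NONE"
--         groups[season]["total"] += 1
--         if signal in ("CALL", "STRONG_CALL"):
--             groups[season]["call"] += 1
--         elif signal in ("PUT", "STRONG_PUT"):
--             groups[season]["put"] += 1
--         else:
--             groups[season]["none"] += 1
--
--     return dict(groups)
-- ===== SOURCE B (Python) =====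
-- from collections import Counter
--
-- MONTH_TO_SEASON = {
--     1: "winter", 2: "winter", 3: "spring", 4: "spring",
--     5: "spring", 6: "summer", 7: "summer", 8: "summer",
--     9: "fall", 10: "fall", 11: "fall", 12: "winter",
-- }
--
-- def _classify(pred):
--     checkin = pred.get("date_from", "")
--     season = "unknown"
--     if checkin and len(checkin) >= 7:
--         try:
--             season = MONTH_TO_SEASON.get(int(checkin[5:7]), "unknown")
--         except (ValueError, IndexError):
--             pass
--     sig = pred.get("option_signal", "NONE") or "NONE"
--     if sig in ("CALL", "STRONG_CALL"):
--         cat = "call"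
--     elif sig in ("PUT", "STRONG_PUT"):
--         cat = "put"
--     else:
--         cat = "none"
--     return season, cat
--
-- def _group_accuracy_by_season(predictions: dict) -> dict[str, dict[str, int]]:
--     """Group predictions by season (classify-then-count with a Counter)."""
--     pairs = [_classify(pred) for pred in predictions.values()]
--     counts = Counter(pairs)
--     result: dict[str, dict[str, int]] = {}
--     for season in dict.fromkeys(s for s, _ in pairs):
--         c = counts[(season, "call")]
--         p = counts[(season, "put")]
--         n = counts[(season, "none")]
--         result[season] = {"total": c + p + n, "call": c, "put": p, "none": n}
--     return result
-- ===== Notes on version B (the rewrite author's own statement) =====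
-- stated objective: alternative
-- what changed: A tallies into a defaultdict-of-dicts in one loop; B first classifies every prediction into a (season, category) pair, counts the pairs with a Counter, then assembles the nested dict per distinct season in a second pass, computing total as call+put+none.
import Mathlib
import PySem

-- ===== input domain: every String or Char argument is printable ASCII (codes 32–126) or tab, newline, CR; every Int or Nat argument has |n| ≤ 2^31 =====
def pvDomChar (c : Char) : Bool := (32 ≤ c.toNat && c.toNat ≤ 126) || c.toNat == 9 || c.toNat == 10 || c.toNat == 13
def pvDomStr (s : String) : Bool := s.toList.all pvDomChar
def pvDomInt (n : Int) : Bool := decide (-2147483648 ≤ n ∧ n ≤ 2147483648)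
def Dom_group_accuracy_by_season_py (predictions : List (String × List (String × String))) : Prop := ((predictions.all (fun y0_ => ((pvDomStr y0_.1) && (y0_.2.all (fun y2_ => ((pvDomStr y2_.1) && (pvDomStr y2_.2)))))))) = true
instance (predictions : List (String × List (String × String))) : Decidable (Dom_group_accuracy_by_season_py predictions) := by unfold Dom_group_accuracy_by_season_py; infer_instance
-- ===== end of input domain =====

-- B replaces A's single defaultdict-of-dicts loop by classify-into-pairs → Counter → per-season assembly;
-- objective: alternative decomposition (same asymptotic cost); equivalence is about the return value (neither mutates its input).

-- shared module-level constant MONTH_TO_SEASON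
def pvMonthToSeason : PySem.Dict Int String := PySem.Dict.ofList
  [(1, "winter"), (2, "winter"), (3, "spring"), (4, "spring"),
   (5, "spring"), (6, "summer"), (7, "summer"), (8, "summer"),
   (9, "fall"), (10, "fall"), (11, "fall"), (12, "winter")]

-- the season / signal extraction both Pythons perform on one prediction dict, named once:
-- season = MONTH_TO_SEASON.get(int(checkin[5:7]), "unknown") guarded by truthiness/length/ValueError
def pvSeasonOf (pred : PySem.Dict String String) : String :=
  let checkin := (pred.getD "date_from" "").toList
  if checkin ≠ [] ∧ 7 ≤ checkin.length then
    match PySem.Int.ofChars? (PySem.List.slice checkin (some 5) (some 7)) with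
    | some month => pvMonthToSeason.getD month "unknown"
    | none => "unknown"
  else "unknown"

-- signal = pred.get("option_signal", "NONE") or "NONE"
def pvSignalOf (pred : PySem.Dict String String) : String :=
  match pred.get? "option_signal" with
  | some s => if s == "" then "NONE" else s
  | none => "NONE"

-- ===== PORT A =====
-- the body of A's for-loop (one prediction folded into `groups`)
def pvAStep (groups : PySem.Dict String (PySem.Dict String Int))
    (kv : String × List (String × String)) : PySem.Dict String (PySem.Dict String Int) :=
  let pred : PySem.Dict String String := PySem.Dict.mk kv.2
  let season := pvSeasonOf pred
  let signal := pvSignalOf pred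
  let inner := groups.getD season
    (PySem.Dict.ofList [("total", 0), ("call", 0), ("put", 0), ("none", 0)])
  let inner := inner.modify "total" 0 (· + 1)
  let inner :=
    if signal == "CALL" || signal == "STRONG_CALL" then inner.modify "call" 0 (· + 1)
    else if signal == "PUT" || signal == "STRONG_PUT" then inner.modify "put" 0 (· + 1)
    else inner.modify "none" 0 (· + 1)
  groups.insert season inner

def group_accuracy_by_season_py (predictions : List (String × List (String × String))) : List (String × List (String × Int)) :=
  let groups := predictions.foldl pvAStep PySem.Dict.empty
  groups.items.map (fun p => (p.1, p.2.items))

-- ===== PORT B =====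
-- B's helper _classify: the (season, category) pair of one prediction
def pvClassify (predList : List (String × String)) : String × String :=
  let pred : PySem.Dict String String := PySem.Dict.mk predList
  let signal := pvSignalOf pred
  let cat : String :=
    if signal == "CALL" || signal == "STRONG_CALL" then "call"
    else if signal == "PUT" || signal == "STRONG_PUT" then "put"
    else "none"
  (pvSeasonOf pred, cat)

def group_accuracy_by_season_py_alt (predictions : List (String × List (String × String))) : List (String × List (String × Int)) :=
  let pairs := predictions.map (fun kv => pvClassify kv.2)
  let counts := PySem.Dict.counter pairs
  (PySem.List.dedup (pairs.map Prod.fst)).map (fun season =>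
    let c := counts.getD (season, "call") 0
    let p := counts.getD (season, "put") 0
    let n := counts.getD (season, "none") 0
    (season, [("total", c + p + n), ("call", c), ("put", p), ("none", n)]))

-- ===== PRECONDITION & SPEC =====
def Spec_group_accuracy_by_season_py (predictions : List (String × List (String × String))) (out : List (String × List (String × Int))) : Prop := out = group_accuracy_by_season_py_alt predictions
instance (predictions : List (String × List (String × String))) (out : List (String × List (String × Int))) : Decidable (Spec_group_accuracy_by_season_py predictions out) := by unfold Spec_group_accuracy_by_season_py; infer_instance

-- ===== CLAIM (what is proved, stated in full; the proofs are below) =====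
def Claim_equal_group_accuracy_by_season_py : Prop := ∀ (predictions : List (String × List (String × String))), Dom_group_accuracy_by_season_py predictions → Spec_group_accuracy_by_season_py predictions (group_accuracy_by_season_py predictions)

-- ===== LEMMAS AND PROOFS =====

-- the per-season tallies of A's groups dict, expressed as counts over the classified pairs
def pvEntry (pairs : List (String × String)) (s : String) : PySem.Dict String Int :=
  PySem.Dict.mk [("total", ((pairs.map Prod.fst).count s : Int)),
                 ("call", (pairs.count (s, "call") : Int)),
                 ("put", (pairs.count (s, "put") : Int)),
                 ("none", (pairs.count (s, "none") : Int))]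

theorem pvClassify_cat (pl : List (String × String)) :
    (pvClassify pl).2 = "call" ∨ (pvClassify pl).2 = "put" ∨ (pvClassify pl).2 = "none" := by
  unfold pvClassify
  dsimp only
  split_ifs <;> simp

-- A's loop body, rephrased through B's classifier: bump "total" and the classified category
theorem pvAStep_eq (groups : PySem.Dict String (PySem.Dict String Int))
    (kv : String × List (String × String)) :
    pvAStep groups kv =
      groups.insert (pvClassify kv.2).1
        (((groups.getD (pvClassify kv.2).1
            (PySem.Dict.ofList [("total", 0), ("call", 0), ("put", 0), ("none", 0)])).modify
              "total" 0 (· + 1)).modify (pvClassify kv.2).2 0 (· + 1)) := by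
  unfold pvAStep pvClassify
  dsimp only
  split_ifs <;> rfl

theorem pv_dedup_append (m : List String) (a : String) :
    PySem.List.dedup (m ++ [a]) =
      if a ∈ m then PySem.List.dedup m else PySem.List.dedup m ++ [a] := by
  simp only [PySem.List.dedup_eq_ofList, PySem.Set.ofList_eq_foldl, List.foldl_append,
    List.foldl_cons, List.foldl_nil]
  rw [show (List.foldl PySem.Set.add [] m) = PySem.Set.ofList m from (PySem.Set.ofList_eq_foldl m).symm]
  unfold PySem.Set.add
  by_cases h : a ∈ m
  · simp [h]
  · simp [h]

theorem pvEntry_append_self (ps : List (String × String)) (s₀ c₀ : String)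
    (hc : c₀ = "call" ∨ c₀ = "put" ∨ c₀ = "none") :
    pvEntry (ps ++ [(s₀, c₀)]) s₀ =
      ((pvEntry ps s₀).modify "total" 0 (· + 1)).modify c₀ 0 (· + 1) := by
  rcases hc with rfl | rfl | rfl <;>
    · unfold pvEntry
      simp [PySem.Dict.modify, PySem.Dict.getD, PySem.Dict.get?, PySem.Dict.insert,
        PySem.Dict.contains, List.count_append, Prod.ext_iff]

theorem pvEntry_append_other (ps : List (String × String)) (s₀ c₀ s : String)
    (hs : s ≠ s₀) : pvEntry (ps ++ [(s₀, c₀)]) s = pvEntry ps s := by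
  unfold pvEntry
  simp [List.count_append, Prod.ext_iff, Ne.symm hs]

theorem pvEntry_not_mem (ps : List (String × String)) (s₀ : String)
    (h : s₀ ∉ ps.map Prod.fst) :
    pvEntry ps s₀ = PySem.Dict.ofList [("total", 0), ("call", 0), ("put", 0), ("none", 0)] := by
  have hz : ∀ c, ps.count (s₀, c) = 0 := by
    intro c
    rw [List.count_eq_zero]
    intro hmem
    exact h (List.mem_map.mpr ⟨(s₀, c), hmem, rfl⟩)
  unfold pvEntry
  rw [List.count_eq_zero.mpr h, hz, hz, hz]
  rfl

-- loop invariant: A's groups dict after any prefix is exactly B's per-season table of that prefix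
theorem pv_inv (l : List (String × List (String × String))) :
    (l.foldl pvAStep PySem.Dict.empty).items =
      (PySem.List.dedup ((l.map (fun kv => pvClassify kv.2)).map Prod.fst)).map
        (fun s => (s, pvEntry (l.map (fun kv => pvClassify kv.2)) s)) := by
  induction l using List.reverseRecOn with
  | nil => rfl
  | append_singleton l x ih =>
    rw [List.foldl_append, List.foldl_cons, List.foldl_nil, pvAStep_eq]
    set st := l.foldl pvAStep PySem.Dict.empty with hst
    set ps := l.map (fun kv => pvClassify kv.2) with hps
    set s₀ := (pvClassify x.2).1 with hs₀
    set c₀ := (pvClassify x.2).2 with hc₀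
    have hmap : (l ++ [x]).map (fun kv => pvClassify kv.2) = ps ++ [(s₀, c₀)] := by
      simp [hps, hs₀, hc₀]
    rw [hmap, List.map_append, List.map_singleton, pv_dedup_append]
    have hkeys : st.keys = PySem.List.dedup (ps.map Prod.fst) := by
      rw [PySem.Dict.keys, ih, List.map_map]
      have hid : ((fun p : String × PySem.Dict String Int => p.1) ∘ fun s => (s, pvEntry ps s)) = id := rfl
      rw [hid, List.map_id]
    have hnd : st.keys.Nodup := by rw [hkeys]; exact PySem.List.nodup_dedup _
    by_cases hmem : s₀ ∈ ps.map Prod.fst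
    · -- existing season: insert overwrites in place
      have hcont : st.contains s₀ = true := by
        rw [PySem.Dict.contains_eq_decide_mem_keys, hkeys]
        simp [hmem]
      have hin : (s₀, pvEntry ps s₀) ∈ st.items := by
        rw [ih]
        exact List.mem_map.mpr ⟨s₀, (PySem.List.mem_dedup _ _).mpr hmem, rfl⟩
      have hgetD : st.getD s₀ (PySem.Dict.ofList [("total", 0), ("call", 0), ("put", 0), ("none", 0)])
          = pvEntry ps s₀ := PySem.Dict.getD_of_mem_items st hin hnd _
      rw [hgetD, PySem.Dict.items_insert_of_contains st _ hcont, ih, List.map_map, if_pos hmem]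
      refine List.map_congr_left (fun s hsmem => ?_)
      by_cases hs : s = s₀
      · subst hs
        simp only [Function.comp_apply, beq_self_eq_true, if_true]
        rw [pvEntry_append_self ps _ c₀ (pvClassify_cat x.2)]
      · simp only [Function.comp_apply, beq_iff_eq, if_neg hs]
        rw [pvEntry_append_other ps s₀ c₀ s hs]
    · -- fresh season: insert appends
      have hcont : st.contains s₀ = false := by
        rw [PySem.Dict.contains_eq_decide_mem_keys, hkeys]
        simp [hmem]
      have hgetD : st.getD s₀ (PySem.Dict.ofList [("total", 0), ("call", 0), ("put", 0), ("none", 0)])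
          = pvEntry ps s₀ := by
        rw [PySem.Dict.getD_of_not_contains st _ hcont, pvEntry_not_mem ps s₀ hmem]
      rw [hgetD, PySem.Dict.items_insert_of_not_contains st _ hcont, ih, if_neg hmem,
        List.map_append, List.map_singleton]
      congr 1
      · refine List.map_congr_left (fun s hsmem => ?_)
        have hs : s ≠ s₀ := by
          intro h; subst h; exact hmem ((PySem.List.mem_dedup _ _).mp hsmem)
        rw [pvEntry_append_other ps s₀ c₀ s hs]
      · rw [pvEntry_append_self ps s₀ c₀ (pvClassify_cat x.2)]

-- A's "total" counter equals B's call+put+none sum, since every category is one of the three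
theorem pv_total_split (pairs : List (String × String))
    (h : ∀ pr ∈ pairs, pr.2 = "call" ∨ pr.2 = "put" ∨ pr.2 = "none") (s : String) :
    ((pairs.map Prod.fst).count s : Int) =
      (pairs.count (s, "call") : Int) + (pairs.count (s, "put") : Int) + (pairs.count (s, "none") : Int) := by
  induction pairs with
  | nil => simp
  | cons pr t ih =>
    have ht := ih (fun x hx => h x (List.mem_cons_of_mem _ hx))
    obtain ⟨f, c⟩ := pr
    have hc := h (f, c) List.mem_cons_self
    simp only [List.map_cons, List.count_cons] at *
    rcases hc with rfl | rfl | rfl <;>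
      by_cases hf : f = s <;>
      simp_all [Prod.ext_iff] <;> omega

-- ===== VERDICT (by name: the statement is the Claim_ definition above) =====
theorem group_accuracy_by_season_py_spec : Claim_equal_group_accuracy_by_season_py := by
  intro predictions _
  unfold Spec_group_accuracy_by_season_py group_accuracy_by_season_py group_accuracy_by_season_py_alt
  dsimp only
  rw [pv_inv, List.map_map]
  refine List.map_congr_left (fun s hs => ?_)
  simp only [Function.comp, pvEntry, PySem.Dict.getD_counter]
  rw [pv_total_split _ (by intro pr hpr; simp only [List.mem_map] at hpr
                           obtain ⟨kv, _, rfl⟩ := hpr; exact pvClassify_cat kv.2)]
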